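-- pv_equiv track=rewrite | github.com/kartikay101/9anime_Downloader | src/populate_links.py | input_link_clean
-- ===== SOURCE A (Python) =====
-- def input_link_clean(inp_link):
--
--     cnt=0
--     res=''
--     for char in inp_link:
--         if char=='/':
--             cnt+=1
--         if cnt==5:
--             break
--         res+=char
--     return res
-- ===== SOURCE B (Python) =====
-- def input_link_clean(inp_link):
--     return '/'.join(inp_link.split('/')[:5])
-- ===== Notes on version B (the rewrite author's own statement) =====
-- stated objective: faster
-- what changed: Replaced the character-by-character counter-and-accumulator scan (with quadratic-prone string concatenation) by a segment-level split on the slash character, taking the first five segments and joining them back.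
import Mathlib
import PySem

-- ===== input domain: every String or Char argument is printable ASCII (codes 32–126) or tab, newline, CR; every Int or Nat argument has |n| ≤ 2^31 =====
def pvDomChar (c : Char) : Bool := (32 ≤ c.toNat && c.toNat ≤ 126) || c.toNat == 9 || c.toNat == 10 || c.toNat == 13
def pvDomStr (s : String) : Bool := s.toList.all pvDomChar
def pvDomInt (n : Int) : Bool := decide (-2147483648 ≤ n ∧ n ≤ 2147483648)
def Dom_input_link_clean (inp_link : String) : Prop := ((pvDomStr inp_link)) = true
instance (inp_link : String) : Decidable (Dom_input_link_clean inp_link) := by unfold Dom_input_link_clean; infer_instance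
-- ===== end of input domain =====

-- B replaces A's character-by-character counter/accumulator scan with a split on the slash character, taking the first five segments and joining them back (measured faster: C-level split/join instead of per-character Python loop).

-- ===== PORT A =====
-- A's for-loop with counter cnt, accumulator res, and break when cnt reaches 5.
def inputLinkCleanLoop : List Char → Int → List Char → List Char
  | [], _, res => res
  | c :: rest, cnt, res =>
      let cnt' := if c = '/' then cnt + 1 else cnt
      if cnt' = 5 then res else inputLinkCleanLoop rest cnt' (res ++ [c])

def input_link_clean (inp_link : String) : String :=
  String.ofList (inputLinkCleanLoop inp_link.toList 0 [])

-- ===== PORT B =====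
-- '/'.join(inp_link.split('/')[:5])
def input_link_clean_alt (inp_link : String) : String :=
  String.ofList
    (PySem.Chars.join ['/']
      (PySem.List.slice (PySem.Chars.splitOn inp_link.toList ['/']) none (some 5)))

-- ===== PRECONDITION & SPEC =====
def Spec_input_link_clean (inp_link : String) (out : String) : Prop := out = input_link_clean_alt inp_link
instance (inp_link : String) (out : String) : Decidable (Spec_input_link_clean inp_link out) := by unfold Spec_input_link_clean; infer_instance

-- ===== CLAIM (what is proved, stated in full; the proofs are below) =====
def Claim_equal_input_link_clean : Prop := ∀ (inp_link : String), Dom_input_link_clean inp_link → Spec_input_link_clean inp_link (input_link_clean inp_link)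

-- ===== LEMMAS AND PROOFS =====

-- A's loop without the accumulator
def loopA : List Char → Int → List Char
  | [], _ => []
  | c :: rest, cnt =>
      let cnt' := if c = '/' then cnt + 1 else cnt
      if cnt' = 5 then [] else c :: loopA rest cnt'

theorem inputLinkCleanLoop_eq (cs : List Char) : ∀ cnt res,
    inputLinkCleanLoop cs cnt res = res ++ loopA cs cnt := by
  induction cs with
  | nil => intro cnt res; simp [inputLinkCleanLoop, loopA]
  | cons c rest ih =>
      intro cnt res
      simp only [inputLinkCleanLoop, loopA, ih]
      split_ifs <;> simp

-- simple recursive characterization of PySem.Chars.splitOn with separator "/"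
def sp : List Char → List Char → List (List Char)
  | [], cur => [cur.reverse]
  | c :: rest, cur => if c = '/' then cur.reverse :: sp rest [] else sp rest (c :: cur)

theorem sp_ne_nil (cs cur : List Char) : sp cs cur ≠ [] := by
  induction cs generalizing cur with
  | nil => simp [sp]
  | cons c rest ih =>
      simp only [sp]
      split
      · simp
      · exact ih _

theorem splitOn_go_eq (fuel : Nat) : ∀ (l cur : List Char) (accs : List (List Char)),
    l.length < fuel →
    PySem.Chars.splitOn.go ['/'] fuel l cur accs = accs.reverse ++ sp l cur := by
  induction fuel with
  | zero => intro l cur accs h; exact absurd h (Nat.not_lt_zero _)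
  | succ fuel ih =>
      intro l cur accs h
      cases l with
      | nil => simp [PySem.Chars.splitOn.go, sp]
      | cons c rest =>
          simp only [PySem.Chars.splitOn.go, List.isPrefixOf, Bool.and_true]
          by_cases hc : c = '/'
          · subst hc
            simp only [beq_self_eq_true, if_pos]
            have hd : List.drop (['/'] : List Char).length ('/' :: rest) = rest := rfl
            rw [hd, ih rest [] (cur.reverse :: accs)
              (by simpa using Nat.lt_of_succ_lt_succ h)]
            simp [sp]
          · have hb : (('/' : Char) == c) = false := by
              simp only [beq_eq_false_iff_ne, ne_eq]
              exact fun h' => hc h'.symm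
            simp only [hb, Bool.false_eq_true, if_neg, not_false_eq_true, sp, if_neg hc]
            exact ih rest (c :: cur) accs (by simpa using Nat.lt_of_succ_lt_succ h)

theorem splitOn_eq_sp (cs : List Char) :
    PySem.Chars.splitOn cs ['/'] = sp cs [] := by
  unfold PySem.Chars.splitOn
  rw [splitOn_go_eq (cs.length + 1) cs [] [] (by omega)]
  simp

-- main invariant: join of first n segments = A's loop with counter 5 - n
theorem join_take_sp (cs : List Char) : ∀ (cur : List Char) (n : Nat), 1 ≤ n →
    PySem.Chars.join ['/'] ((sp cs cur).take n) = cur.reverse ++ loopA cs (5 - (n : Int)) := by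
  induction cs with
  | nil =>
      intro cur n hn
      cases n with
      | zero => omega
      | succ m =>
          simp only [sp, loopA, List.take_succ_cons, List.take_nil,
            PySem.Chars.join_singleton, List.append_nil]
  | cons c rest ih =>
      intro cur n hn
      by_cases hc : c = '/'
      · subst hc
        have hsp1 : sp ('/' :: rest) cur = cur.reverse :: sp rest [] := by simp [sp]
        have hA : loopA ('/' :: rest) (5 - (n : Int)) =
            if 5 - (n : Int) + 1 = 5 then [] else '/' :: loopA rest (5 - (n : Int) + 1) := by
          simp [loopA]
        rw [hsp1, hA]
        cases n with
        | zero => omega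
        | succ m =>
          cases m with
          | zero =>
              rw [if_pos (by norm_num)]
              simp [PySem.Chars.join_singleton]
          | succ k =>
              rw [if_neg (by push_cast; omega)]
              obtain ⟨h0, t0, hsp⟩ : ∃ h0 t0, sp rest [] = h0 :: t0 := by
                cases hh : sp rest [] with
                | nil => exact absurd hh (sp_ne_nil rest [])
                | cons a b => exact ⟨a, b, rfl⟩
              rw [List.take_succ_cons, hsp, List.take_succ_cons,
                PySem.Chars.join_cons_cons]
              have hih := ih [] (k + 1) (by omega)
              rw [hsp, List.take_succ_cons] at hih
              rw [hih]
              push_cast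
              rw [show (5:Int) - (↑k + 1 + 1) + 1 = 5 - (↑k + 1) from by ring]
              simp
      · simp only [sp, if_neg hc, loopA]
        rw [if_neg (show ¬(5 - (n : Int) = 5) by omega)]
        rw [ih (c :: cur) n hn]
        simp

-- ===== VERDICT (by name: the statement is the Claim_ definition above) =====
theorem input_link_clean_spec : Claim_equal_input_link_clean := by
  intro s _
  unfold Spec_input_link_clean input_link_clean input_link_clean_alt
  have hslice : PySem.List.slice (PySem.Chars.splitOn s.toList ['/']) none (some 5)
      = (PySem.Chars.splitOn s.toList ['/']).take 5 := by
    rw [PySem.List.slice_to _ (by norm_num : (0:Int) ≤ 5)]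
    rfl
  rw [inputLinkCleanLoop_eq, hslice, splitOn_eq_sp]
  have h := join_take_sp s.toList [] 5 (by omega)
  norm_num at h
  rw [h]
  simp
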